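-- pv_equiv track=rewrite | github.com/connectome-neuprint/neuVid | neuVid/gen.py | copy_animation
-- ===== SOURCE A (Python) =====
-- def copy_animation(s):
--     if s:
--         lines = s.split("\n")
--         lines_copied = []
--         copying = False
--         for line in lines:
--             if not copying:
--                 if line.lstrip().startswith('"animation": ['):
--                     copying = True
--             if copying:
--                 lines_copied.append(line)
--                 line_stripped = line.lstrip().rstrip()
--                 if line_stripped.endswith("[]") or line_stripped == "]":
--                     return lines_copied
--     return ['  "animation": []']
-- ===== SOURCE B (Python) =====
-- def copy_animation(s):
--     default = ['  "animation": []']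
--     if not s:
--         return default
--     lines = s.split("\n")
--     starts = [i for i, l in enumerate(lines)
--               if l.lstrip().startswith('"animation": [')]
--     if not starts:
--         return default
--     start = starts[0]
--     ends = [j for j, l in enumerate(lines)
--             if j >= start and (l.strip().endswith("[]") or l.strip() == "]")]
--     if not ends:
--         return default
--     return lines[start:ends[0] + 1]
-- ===== Notes on version B (the rewrite author's own statement) =====
-- stated objective: alternative
-- what changed: B replaces A's stateful scan (a 'copying' flag threaded through one loop with in-loop appends and early return) by index arithmetic: it builds the list of start-marker indices and the list of terminator indices at or after the first start via comprehensions, and returns the slice lines[start:end+1] instead of accumulating lines.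
import Mathlib
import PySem

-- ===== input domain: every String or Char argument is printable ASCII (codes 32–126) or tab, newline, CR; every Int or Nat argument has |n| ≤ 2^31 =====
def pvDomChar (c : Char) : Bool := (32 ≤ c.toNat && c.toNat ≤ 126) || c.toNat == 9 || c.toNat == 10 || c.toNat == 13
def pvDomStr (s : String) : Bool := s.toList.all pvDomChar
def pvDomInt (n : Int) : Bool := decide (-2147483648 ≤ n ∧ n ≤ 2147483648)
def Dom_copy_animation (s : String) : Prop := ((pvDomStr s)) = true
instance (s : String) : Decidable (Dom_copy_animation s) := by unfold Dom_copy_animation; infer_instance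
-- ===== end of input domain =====

-- B replaces A's stateful flag-scan with index arithmetic: comprehensions collecting the
-- start-marker indices and the terminator indices, then a slice lines[start:end+1].
-- Objective: alternative decomposition, same cost.

-- ===== PORT A =====
-- the for-loop with early return: recursion over the lines with state (lines_copied, copying)
def pvALoop : List String → List String → Bool → Option (List String)
  | [], _, _ => none
  | line :: rest, lines_copied, copying =>
    let copying :=
      if !copying && PySem.Str.startswith (PySem.Str.lstrip line) "\"animation\": [" then
        true
      else copying
    if copying then
      let lines_copied := lines_copied ++ [line]
      let line_stripped := PySem.Str.rstrip (PySem.Str.lstrip line)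
      if PySem.Str.endswith line_stripped "[]" || line_stripped == "]" then
        some lines_copied
      else pvALoop rest lines_copied copying
    else pvALoop rest lines_copied copying

def copy_animation (s : String) : List String :=
  if s ≠ "" then
    match pvALoop ((PySem.Str.split? s "\n").getD []) [] false with
    | some r => r
    | none => ["  \"animation\": []"]
  else ["  \"animation\": []"]

-- ===== PORT B =====
def copy_animation_alt (s : String) : List String :=
  if s ≠ "" then
    let lines := (PySem.Str.split? s "\n").getD []
    -- starts = [i for i, l in enumerate(lines) if l.lstrip().startswith('"animation": [')]
    let starts := ((PySem.List.enumerate lines 0).filter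
      (fun p => PySem.Str.startswith (PySem.Str.lstrip p.2) "\"animation\": [")).map (·.1)
    match starts with
    | [] => ["  \"animation\": []"]
    | start :: _ =>
      -- ends = [j for j, l in enumerate(lines) if j >= start and (l.strip().endswith("[]") or l.strip() == "]")]
      let ends := ((PySem.List.enumerate lines 0).filter
        (fun p => decide (start ≤ p.1) &&
          (PySem.Str.endswith (PySem.Str.strip p.2) "[]" || PySem.Str.strip p.2 == "]"))).map (·.1)
      match ends with
      | [] => ["  \"animation\": []"]
      | e :: _ => PySem.List.slice lines (some start) (some (e + 1))
  else ["  \"animation\": []"]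

-- ===== PRECONDITION & SPEC =====
def Spec_copy_animation (s : String) (out : List String) : Prop := out = copy_animation_alt s
instance (s : String) (out : List String) : Decidable (Spec_copy_animation s out) := by unfold Spec_copy_animation; infer_instance

-- ===== CLAIM (what is proved, stated in full; the proofs are below) =====
def Claim_equal_copy_animation : Prop := ∀ (s : String), Dom_copy_animation s → Spec_copy_animation s (copy_animation s)

-- ===== LEMMAS AND PROOFS =====

-- proof-only: the collect-until-terminator loop both characterizations factor through
def pvCollect : List String → List String → Option (List String)
  | [], _ => none
  | line :: rest, collected =>
    let collected := collected ++ [line]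
    let stripped := PySem.Str.strip line
    if PySem.Str.endswith stripped "[]" || stripped == "]" then
      some collected
    else pvCollect rest collected

theorem strip_eq_rstrip_lstrip (l : String) :
    PySem.Str.strip l = PySem.Str.rstrip (PySem.Str.lstrip l) := by
  simp [PySem.Str.strip, PySem.Str.rstrip, PySem.Str.lstrip,
        PySem.Chars.strip, PySem.Chars.rstrip, PySem.Chars.lstrip]

theorem aLoop_true_eq_collect (ls acc : List String) :
    pvALoop ls acc true = pvCollect ls acc := by
  induction ls generalizing acc with
  | nil => rfl
  | cons l rest ih =>
    simp only [pvALoop, pvCollect, strip_eq_rstrip_lstrip]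
    split <;> simp [ih]

theorem aLoop_false_eq_find (ls : List String) :
    pvALoop ls [] false =
      match ls.findIdx? (fun l => PySem.Str.startswith (PySem.Str.lstrip l) "\"animation\": [") with
      | some start => pvCollect (ls.drop start) []
      | none => none := by
  induction ls with
  | nil => rfl
  | cons l rest ih =>
    by_cases h : PySem.Str.startswith (PySem.Str.lstrip l) "\"animation\": [" = true
    · have h' : PySem.Chars.startswith (PySem.Chars.lstrip l.toList)
          ['\"', 'a', 'n', 'i', 'm', 'a', 't', 'i', 'o', 'n', '\"', ':', ' ', '['] = true := by
        simpa using h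
      have h0 : (l :: rest).findIdx?
          (fun l => PySem.Str.startswith (PySem.Str.lstrip l) "\"animation\": [") = some 0 := by
        simp [List.findIdx?_cons, h']
      rw [h0]
      simp only [List.drop_zero]
      simp [pvALoop, pvCollect, h', strip_eq_rstrip_lstrip, aLoop_true_eq_collect]
    · have h' : PySem.Chars.startswith (PySem.Chars.lstrip l.toList)
          ['\"', 'a', 'n', 'i', 'm', 'a', 't', 'i', 'o', 'n', '\"', ':', ' ', '['] = false := by
        simpa using h
      have h0 : (l :: rest).findIdx?
          (fun l => PySem.Str.startswith (PySem.Str.lstrip l) "\"animation\": [") =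
          (rest.findIdx?
            (fun l => PySem.Str.startswith (PySem.Str.lstrip l) "\"animation\": [")).map (· + 1) := by
        simp [List.findIdx?_cons, h']
      rw [h0]
      have ha : pvALoop (l :: rest) [] false = pvALoop rest [] false := by
        simp [pvALoop, h']
      rw [ha, ih]
      cases hf : rest.findIdx?
          (fun l => PySem.Str.startswith (PySem.Str.lstrip l) "\"animation\": [") <;> simp

-- the collect loop returns exactly the slice up to the first terminator
theorem collect_eq_findIdx (ls acc : List String) :
    pvCollect ls acc =
      (ls.findIdx? (fun l => PySem.Str.endswith (PySem.Str.strip l) "[]" || PySem.Str.strip l == "]")).map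
        (fun j => acc ++ ls.take (j + 1)) := by
  induction ls generalizing acc with
  | nil => rfl
  | cons l rest ih =>
    simp only [pvCollect, List.findIdx?_cons]
    by_cases hc : (PySem.Str.endswith (PySem.Str.strip l) "[]" || PySem.Str.strip l == "]") = true
    · rw [if_pos hc, if_pos hc]
      simp
    · rw [if_neg hc, if_neg hc, ih]
      cases hf : rest.findIdx?
          (fun l => PySem.Str.endswith (PySem.Str.strip l) "[]" || PySem.Str.strip l == "]") <;> simp

-- first index produced by the filtered enumeration = findIdx?, offset by the enumeration start
theorem enum_filter_head (ls : List String) (s : Nat) (r : String → Bool) :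
    ((((PySem.List.enumerate ls (s : Int)).filter (fun p => r p.2)).map (·.1)).head?)
      = (ls.findIdx? r).map (fun k => ((s + k : Nat) : Int)) := by
  induction ls generalizing s with
  | nil => rfl
  | cons l rest ih =>
    rw [PySem.List.enumerate_cons]
    by_cases h : r l = true
    · simp [List.findIdx?_cons, h]
    · have hcast : ((s : Int) + 1) = ((s + 1 : Nat) : Int) := by push_cast; ring
      rw [List.filter_cons]
      simp only [h, Bool.false_eq_true, if_false, hcast, ih]
      simp only [List.findIdx?_cons, h, Bool.false_eq_true, if_false]
      cases hf : rest.findIdx? r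
      · simp
      · simp
        omega

-- the (j >= start)-filtered enumeration: first match is findIdx? on the dropped tail, shifted
theorem enum_filter_ge_head (ls : List String) (i : Nat) (hi : i ≤ ls.length) (r : String → Bool) :
    ((((PySem.List.enumerate ls 0).filter
        (fun p => decide (((i : Nat) : Int) ≤ p.1) && r p.2)).map (·.1)).head?)
      = ((ls.drop i).findIdx? r).map (fun k => ((i + k : Nat) : Int)) := by
  conv_lhs => rw [← List.take_append_drop i ls]
  rw [PySem.List.enumerate_append, List.filter_append, List.map_append]
  have hlen : (ls.take i).length = i := by simp [hi]
  have h1 : (PySem.List.enumerate (ls.take i) 0).filter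
      (fun p => decide (((i : Nat) : Int) ≤ p.1) && r p.2) = [] := by
    rw [List.filter_eq_nil_iff]
    intro p hp
    rcases (PySem.List.mem_enumerate_iff _ _ _).1 hp with ⟨k, hk, rfl⟩
    have hki : k < i := by rw [hlen] at hk; exact hk
    simp only [Bool.and_eq_true, decide_eq_true_eq, not_and]
    intro hle
    exfalso
    omega
  rw [h1]
  simp only [List.map_nil, List.nil_append, hlen, zero_add]
  have h2 : (PySem.List.enumerate (ls.drop i) (i : Int)).filter
      (fun p => decide (((i : Nat) : Int) ≤ p.1) && r p.2)
      = (PySem.List.enumerate (ls.drop i) (i : Int)).filter (fun p => r p.2) := by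
    apply List.filter_congr
    intro p hp
    rcases (PySem.List.mem_enumerate_iff _ _ _).1 hp with ⟨k, hk, rfl⟩
    have : ((i : Nat) : Int) ≤ (i : Int) + (k : Int) := by omega
    simp [this]
  rw [h2, enum_filter_head]

-- ===== VERDICT (by name: the statement is the Claim_ definition above) =====
theorem copy_animation_spec : Claim_equal_copy_animation := by
  intro s _
  unfold Spec_copy_animation copy_animation copy_animation_alt
  by_cases hs : s = ""
  · simp [hs]
  · simp only [if_pos (by exact hs : s ≠ "")]
    set ls := (PySem.Str.split? s "\n").getD [] with hls
    rw [aLoop_false_eq_find]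
    have hstarts := enum_filter_head ls 0
      (fun l => PySem.Str.startswith (PySem.Str.lstrip l) "\"animation\": [")
    simp only [Nat.cast_zero, Nat.zero_add] at hstarts
    cases hf : ls.findIdx? (fun l => PySem.Str.startswith (PySem.Str.lstrip l) "\"animation\": [") with
    | none =>
      rw [hf] at hstarts
      simp only [Option.map_none] at hstarts
      rcases hnil : (((PySem.List.enumerate ls 0).filter
          (fun p => PySem.Str.startswith (PySem.Str.lstrip p.2) "\"animation\": [")).map (·.1)) with _ | ⟨a, t⟩
      · rw [hnil]
      · rw [hnil] at hstarts; simp at hstarts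
    | some i =>
      have hi : i ≤ ls.length := by
        obtain ⟨hlt, -⟩ := List.findIdx?_eq_some_iff_getElem.mp hf
        exact hlt.le
      rw [hf] at hstarts
      rcases hnil : (((PySem.List.enumerate ls 0).filter
          (fun p => PySem.Str.startswith (PySem.Str.lstrip p.2) "\"animation\": [")).map (·.1)) with _ | ⟨a, t⟩
      · rw [hnil] at hstarts; simp at hstarts
      · rw [hnil] at hstarts
        simp only [List.head?_cons, Option.map_some] at hstarts
        have ha : a = ((i : Nat) : Int) := by injection hstarts
        subst ha
        rw [hnil]
        conv_rhs => whnf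
        dsimp only
        rw [collect_eq_findIdx]
        have hends := enum_filter_ge_head ls i hi
          (fun l => PySem.Str.endswith (PySem.Str.strip l) "[]" || PySem.Str.strip l == "]")
        cases hq : (ls.drop i).findIdx?
            (fun l => PySem.Str.endswith (PySem.Str.strip l) "[]" || PySem.Str.strip l == "]") with
        | none =>
          rw [hq] at hends
          simp only [Option.map_none] at hends
          rcases henil : (((PySem.List.enumerate ls 0).filter
              (fun p => decide (((i : Nat) : Int) ≤ p.1) &&
                (PySem.Str.endswith (PySem.Str.strip p.2) "[]" || PySem.Str.strip p.2 == "]"))).map (·.1))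
              with _ | ⟨e, t2⟩
          · rw [henil]
            rfl
          · rw [henil] at hends; simp at hends
        | some j =>
          rw [hq] at hends
          rcases henil : (((PySem.List.enumerate ls 0).filter
              (fun p => decide (((i : Nat) : Int) ≤ p.1) &&
                (PySem.Str.endswith (PySem.Str.strip p.2) "[]" || PySem.Str.strip p.2 == "]"))).map (·.1))
              with _ | ⟨e, t2⟩
          · rw [henil] at hends; simp at hends
          · rw [henil] at hends
            simp only [List.head?_cons, Option.map_some] at hends
            have he : e = ((i + j : Nat) : Int) := by injection hends
            subst he
            rw [henil]
            dsimp only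
            simp only [Option.map_some]
            have hcast : ((i + j : Nat) : Int) + 1 = ((i : Nat) : Int) + ((j + 1 : Nat) : Int) := by
              push_cast; ring
            rw [hcast, PySem.List.slice_natCast_add]
            simp
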